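-- pv_equiv track=rewrite | github.com/LettsDoSomeCoding/advent-of-code-2019 | day4.py | check_double_digits
-- ===== SOURCE A (Python) =====
-- def check_double_digits(numberString):
--     for char in set(numberString):
--         if (numberString.count(char * 4) > 0 or
--             (numberString.count(char * 3) == 1 and numberString.count(char * 2) == 1) or
--             (numberString.count(char * 2) == 0)):
--             continue
--         return True
--     return False
-- ===== SOURCE B (Python) =====
-- def _flush(acc, c, r):
--     c2, c3, c4 = acc.get(c, (0, 0, 0))
--     acc[c] = (c2 + r // 2, c3 + r // 3, c4 + r // 4)
--
--
-- def check_double_digits(numberString):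
--     acc = {}
--     prev = None
--     run = 0
--     for ch in numberString:
--         if ch == prev:
--             run += 1
--         else:
--             if prev is not None:
--                 _flush(acc, prev, run)
--             prev = ch
--             run = 1
--     if prev is not None:
--         _flush(acc, prev, run)
--     for c2, c3, c4 in acc.values():
--         if c4 > 0 or (c3 == 1 and c2 == 1) or c2 == 0:
--             continue
--         return True
--     return False
-- ===== Notes on version B (the rewrite author's own statement) =====
-- stated objective: alternative
-- what changed: Instead of calling str.count on char*2/3/4 for every distinct character (each a full scan), B makes one run-length pass accumulating floor(r/2), floor(r/3), floor(r/4) per character into a dict, then applies the same predicate per character.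
import Mathlib
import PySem

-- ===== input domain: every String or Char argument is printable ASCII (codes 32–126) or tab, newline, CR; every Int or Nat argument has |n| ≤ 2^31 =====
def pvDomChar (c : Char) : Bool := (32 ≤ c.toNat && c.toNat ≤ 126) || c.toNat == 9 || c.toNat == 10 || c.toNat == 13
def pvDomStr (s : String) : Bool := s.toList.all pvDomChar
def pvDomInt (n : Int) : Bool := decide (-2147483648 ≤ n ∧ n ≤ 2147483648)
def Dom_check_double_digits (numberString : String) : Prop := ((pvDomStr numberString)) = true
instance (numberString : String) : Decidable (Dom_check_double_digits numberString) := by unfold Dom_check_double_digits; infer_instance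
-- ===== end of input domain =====

-- B replaces A's per-character str.count scans (char*2/3/4 for every distinct char) by a single
-- run-length pass accumulating floor-division counts per character; objective: alternative algorithm.


-- ===== PORT A =====
-- char * k for a 1-character string char
def pvRep (k : Nat) (c : Char) : String := String.ofList (List.replicate k c)

-- the condition of A's 'continue' branch
def pvCondA (s : String) (c : Char) : Bool :=
  decide (0 < PySem.Str.count s (pvRep 4 c)) ||
  (PySem.Str.count s (pvRep 3 c) == 1 && PySem.Str.count s (pvRep 2 c) == 1) ||
  (PySem.Str.count s (pvRep 2 c) == 0)

-- 'for char in set(numberString): if cond: continue; return True' ; 'return False' after the loop.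
-- The result is order-independent (a boolean any), so iterating PySem.Set's list is exact.
def pvLoopA (s : String) : List Char → Bool
  | [] => false
  | c :: rest => if pvCondA s c then pvLoopA s rest else true

def check_double_digits (numberString : String) : Bool :=
  pvLoopA numberString (PySem.Set.ofList numberString.toList)

-- ===== PORT B =====
-- _flush(acc, c, r): acc[c] = componentwise old + (r//2, r//3, r//4)
def pvFlush (acc : PySem.Dict Char (Int × Int × Int)) (c : Char) (r : Int) :
    PySem.Dict Char (Int × Int × Int) :=
  let t := acc.getD c (0, 0, 0)
  acc.insert c (t.1 + PySem.Int.floordiv r 2, t.2.1 + PySem.Int.floordiv r 3, t.2.2 + PySem.Int.floordiv r 4)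

-- the body of B's 'for ch in numberString' loop (state: prev, run, acc)
def pvStepB (st : Option Char × Int × PySem.Dict Char (Int × Int × Int)) (ch : Char) :
    Option Char × Int × PySem.Dict Char (Int × Int × Int) :=
  match st with
  | (prev, run, acc) =>
    match prev with
    | some p => if ch == p then (some p, run + 1, acc) else (some ch, 1, pvFlush acc p run)
    | none => (some ch, 1, acc)

-- the trailing 'if prev is not None: _flush(acc, prev, run)'
def pvFinalB (st : Option Char × Int × PySem.Dict Char (Int × Int × Int)) :
    PySem.Dict Char (Int × Int × Int) :=
  match st with
  | (none, _, acc) => acc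
  | (some p, run, acc) => pvFlush acc p run

-- 'for c2, c3, c4 in acc.values(): if …: continue; return True' ; 'return False'
def pvValuesLoop : List (Int × Int × Int) → Bool
  | [] => false
  | (c2, c3, c4) :: rest =>
    if c4 > 0 || (c3 == 1 && c2 == 1) || c2 == 0 then pvValuesLoop rest else true

def check_double_digits_alt (numberString : String) : Bool :=
  pvValuesLoop (PySem.Dict.values
    (pvFinalB (numberString.toList.foldl pvStepB (none, 0, PySem.Dict.empty))))

-- ===== PRECONDITION & SPEC =====
def Spec_check_double_digits (numberString : String) (out : Bool) : Prop := out = check_double_digits_alt numberString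
instance (numberString : String) (out : Bool) : Decidable (Spec_check_double_digits numberString out) := by unfold Spec_check_double_digits; infer_instance

-- ===== CLAIM (what is proved, stated in full; the proofs are below) =====
def Claim_equal_check_double_digits : Prop := ∀ (numberString : String), Dom_check_double_digits numberString → Spec_check_double_digits numberString (check_double_digits numberString)

-- ===== LEMMAS AND PROOFS =====

-- structural-recursion version of Python's non-overlapping s.count(c^k)
def pvCnt (k : Nat) (c : Char) : List Char → Nat
  | [] => 0
  | x :: t =>
    if (List.replicate k c).isPrefixOf (x :: t) then 1 + pvCnt k c (List.drop (k - 1) t)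
    else pvCnt k c t
termination_by l => l.length
decreasing_by all_goals simp [List.length_drop]

-- maximal runs of a list, left to right: (char, run length)
def pvRuns : List Char → List (Char × Nat)
  | [] => []
  | x :: t =>
    (x, (t.takeWhile (· == x)).length + 1) :: pvRuns (t.dropWhile (· == x))
termination_by l => l.length
decreasing_by simpa using Nat.lt_succ_of_le (List.length_dropWhile_le _ _)

-- run-sum of floor divisions for character c
def pvRunSum (k : Nat) (c : Char) (rs : List (Char × Nat)) : Nat :=
  (rs.map (fun p => if p.1 = c then p.2 / k else 0)).sum

def pvDictOfRuns (acc : PySem.Dict Char (Int × Int × Int)) (rs : List (Char × Nat)) :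
    PySem.Dict Char (Int × Int × Int) :=
  rs.foldl (fun d p => pvFlush d p.1 (p.2 : Int)) acc

theorem pvCount_go (k : Nat) (c : Char) (hk : 1 ≤ k) :
    ∀ (fuel : Nat) (l : List Char) (acc : Nat), l.length ≤ fuel →
      PySem.Chars.count.go (List.replicate k c) fuel l acc = acc + pvCnt k c l := by
  intro fuel
  induction fuel with
  | zero =>
    intro l acc h
    have hl : l = [] := List.eq_nil_of_length_eq_zero (Nat.le_zero.mp h)
    subst hl
    simp [PySem.Chars.count.go, pvCnt]
  | succ fuel ih =>
    intro l acc h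
    match l with
    | [] => simp [PySem.Chars.count.go, pvCnt]
    | x :: t =>
      by_cases hp : (List.replicate k c).isPrefixOf (x :: t) = true
      · rw [PySem.Chars.count.go]
        simp only [hp, if_pos, List.length_replicate]
        rw [show List.drop k (x :: t) = List.drop (k - 1) t from by
          obtain ⟨k', rfl⟩ := Nat.exists_eq_add_of_le hk
          simp [Nat.add_comm]]
        rw [ih _ (acc + 1) (by
          simp only [List.length_cons] at h
          simp only [List.length_drop]
          omega)]
        rw [pvCnt, if_pos hp]
        omega
      · rw [PySem.Chars.count.go]
        simp only [hp, Bool.false_eq_true, if_false]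
        rw [ih t acc (by simp at h; omega)]
        rw [pvCnt, if_neg hp]

theorem pvCount_eq (k : Nat) (c : Char) (hk : 1 ≤ k) (s : List Char) :
    PySem.Chars.count s (List.replicate k c) = pvCnt k c s := by
  rw [PySem.Chars.count]
  rw [if_neg (by simp; omega)]
  rw [pvCount_go k c hk s.length s 0 le_rfl]
  omega

theorem pvCnt_cons_ne (k : Nat) (c x : Char) (hk : 1 ≤ k) (hx : x ≠ c) (t : List Char) :
    pvCnt k c (x :: t) = pvCnt k c t := by
  obtain ⟨k', rfl⟩ := Nat.exists_eq_add_of_le hk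
  rw [pvCnt, if_neg]
  rw [List.isPrefixOf_iff_prefix, Nat.add_comm 1 k', List.replicate_succ]
  simp [List.cons_prefix_cons, Ne.symm hx]

theorem pvCnt_rep (k : Nat) (c : Char) (hk : 1 ≤ k) :
    ∀ (r : Nat) (t : List Char), t.head? ≠ some c →
      pvCnt k c (List.replicate r c ++ t) = r / k + pvCnt k c t := by
  intro r
  induction r using Nat.strong_induction_on with
  | _ r ihr =>
    intro t ht
    by_cases hrk : k ≤ r
    · have hr1 : 1 ≤ r := le_trans hk hrk
      have hrep : List.replicate r c = c :: List.replicate (r - 1) c := by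
        obtain ⟨r', rfl⟩ := Nat.exists_eq_add_of_le hr1
        simp [List.replicate_succ, Nat.add_comm]
      rw [hrep, List.cons_append, pvCnt, if_pos]
      · rw [show List.drop (k - 1) (List.replicate (r - 1) c ++ t)
              = List.replicate (r - k) c ++ t from by
          rw [List.drop_append_of_le_length (by simp; omega), List.drop_replicate]
          congr 2
          omega]
        rw [ihr (r - k) (by omega) t ht]
        rw [Nat.div_eq_sub_div (by omega) hrk]
        omega
      · rw [List.isPrefixOf_iff_prefix, ← List.cons_append, ← hrep]
        exact ⟨List.replicate (r - k) c ++ t, by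
          rw [← List.append_assoc, ← List.replicate_add]
          congr 2
          omega⟩
    · by_cases hr0 : r = 0
      · subst hr0
        simp [Nat.zero_div]
      · have hrep : List.replicate r c = c :: List.replicate (r - 1) c := by
          obtain ⟨r', rfl⟩ := Nat.exists_eq_add_of_le (by omega : 1 ≤ r)
          simp [List.replicate_succ, Nat.add_comm]
        rw [hrep, List.cons_append, pvCnt, if_neg]
        · rw [ihr (r - 1) (by omega) t ht]
          rw [Nat.div_eq_of_lt (by omega), Nat.div_eq_of_lt (by omega)]
        · rw [List.isPrefixOf_iff_prefix, ← List.cons_append, ← hrep]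
          intro hpre
          have hsplit : List.replicate k c = List.replicate r c ++ List.replicate (k - r) c := by
            rw [← List.replicate_add]
            congr 1
            omega
          rw [hsplit, List.prefix_append_right_inj] at hpre
          obtain ⟨u, hu⟩ := hpre
          apply ht
          rw [← hu, List.head?_append, List.head?_replicate, if_neg (by omega)]
          rfl

theorem pvCnt_rep_ne (k : Nat) (c d : Char) (hk : 1 ≤ k) (hd : d ≠ c) (r : Nat) (t : List Char) :
    pvCnt k c (List.replicate r d ++ t) = pvCnt k c t := by
  induction r with
  | zero => simp
  | succ r ih =>
    rw [List.replicate_succ, List.cons_append, pvCnt_cons_ne k c d hk hd, ih]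

theorem pvTakeWhile_replicate (x : Char) (t : List Char) :
    t.takeWhile (· == x) = List.replicate (t.takeWhile (· == x)).length x := by
  rw [List.eq_replicate_iff]
  exact ⟨rfl, fun b hb => by simpa using List.mem_takeWhile_imp hb⟩

theorem pvHead_dropWhile (x : Char) (t : List Char) :
    (t.dropWhile (· == x)).head? ≠ some x := by
  have h := List.head?_dropWhile_not (· == x) t
  intro hc
  rw [hc] at h
  simp at h

theorem pvCnt_runs (k : Nat) (c : Char) (hk : 1 ≤ k) (s : List Char) :
    pvCnt k c s = pvRunSum k c (pvRuns s) := by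
  induction s using pvRuns.induct with
  | case1 => simp [pvRuns, pvRunSum, pvCnt]
  | case2 x t ih =>
    rw [pvRuns]
    have hdec : x :: t
        = List.replicate ((t.takeWhile (· == x)).length + 1) x ++ t.dropWhile (· == x) := by
      conv_lhs => rw [show t = t.takeWhile (· == x) ++ t.dropWhile (· == x) from
        (List.takeWhile_append_dropWhile).symm]
      rw [List.replicate_succ, List.cons_append]
      congr 1
      exact congrArg (· ++ _) (pvTakeWhile_replicate x t) |>.symm ▸ rfl
    by_cases hcx : x = c
    · subst hcx
      rw [hdec, pvCnt_rep k x hk _ _ (pvHead_dropWhile x t), ih]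
      simp [pvRunSum]
    · rw [hdec, pvCnt_rep_ne k c x hk hcx _ _, ih]
      simp [pvRunSum, hcx]

theorem pvMem_runs (s : List Char) (c : Char) :
    c ∈ (pvRuns s).map Prod.fst ↔ c ∈ s := by
  induction s using pvRuns.induct with
  | case1 => simp [pvRuns]
  | case2 x t ih =>
    rw [pvRuns]
    simp only [List.map_cons, List.mem_cons, ih]
    constructor
    · rintro (rfl | h)
      · exact Or.inl rfl
      · exact Or.inr (List.dropWhile_sublist _ |>.mem h)
    · rintro (rfl | ht)
      · exact Or.inl rfl
      · by_cases hcx : c = x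
        · exact Or.inl hcx
        · right
          have : c ∈ t.takeWhile (· == x) ++ t.dropWhile (· == x) := by
            rw [List.takeWhile_append_dropWhile]; exact ht
          rcases List.mem_append.mp this with h1 | h2
          · exact absurd (by simpa using List.mem_takeWhile_imp h1) hcx
          · exact h2

theorem pvFoldRep : ∀ (m : Nat) (x : Char) (j : Nat) (acc : PySem.Dict Char (Int × Int × Int)),
    List.foldl pvStepB (some x, (j : Int), acc) (List.replicate m x)
      = (some x, ((j + m : Nat) : Int), acc) := by
  intro m
  induction m with
  | zero => intro x j acc; simp
  | succ m ih =>
    intro x j acc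
    rw [List.replicate_succ, List.foldl_cons]
    rw [show pvStepB (some x, ((j : Nat) : Int), acc) x = (some x, ((j + 1 : Nat) : Int), acc) from by
      simp [pvStepB]]
    rw [ih x (j + 1) acc]
    congr 2
    omega

theorem pvFoldG_aux : ∀ (n : Nat) (l : List Char), l.length ≤ n →
    ∀ (x : Char) (j : Nat) (acc : PySem.Dict Char (Int × Int × Int)),
    pvFinalB (l.foldl pvStepB (some x, (j : Int), acc))
      = pvDictOfRuns (pvFlush acc x ((j + (l.takeWhile (· == x)).length : Nat) : Int))
          (pvRuns (l.dropWhile (· == x))) := by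
  intro n
  induction n with
  | zero =>
    intro l hl x j acc
    have : l = [] := List.eq_nil_of_length_eq_zero (Nat.le_zero.mp hl)
    subst this
    simp [pvFinalB, pvDictOfRuns, pvRuns]
  | succ n ih =>
    intro l hl x j acc
    have hdec : l = l.takeWhile (· == x) ++ l.dropWhile (· == x) :=
      (List.takeWhile_append_dropWhile).symm
    conv_lhs => rw [hdec]
    rw [List.foldl_append]
    rw [show List.foldl pvStepB (some x, (j : Int), acc) (l.takeWhile (· == x))
          = (some x, ((j + (l.takeWhile (· == x)).length : Nat) : Int), acc) from by
      conv_lhs => rw [pvTakeWhile_replicate x l]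
      exact pvFoldRep _ x j acc]
    cases hdrop : l.dropWhile (· == x) with
    | nil => simp [pvFinalB, pvDictOfRuns, pvRuns]
    | cons y r' =>
      have hyx : ¬ (y == x) = true := by
        have h := List.head?_dropWhile_not (· == x) l
        rw [hdrop] at h
        simpa using h
      rw [List.foldl_cons]
      rw [show pvStepB (some x, ((j + (l.takeWhile (· == x)).length : Nat) : Int), acc) y
            = (some y, ((1 : Nat) : Int),
               pvFlush acc x ((j + (l.takeWhile (· == x)).length : Nat) : Int)) from by
        simp [pvStepB, hyx]]
      have hlen : r'.length ≤ n := by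
        have h1 : (l.dropWhile (· == x)).length ≤ l.length := List.length_dropWhile_le _ _
        rw [hdrop] at h1
        simp only [List.length_cons] at h1
        omega
      rw [ih r' hlen y 1 _]
      rw [pvRuns]
      rw [show pvDictOfRuns (pvFlush acc x ((j + (l.takeWhile (· == x)).length : Nat) : Int))
            ((y, (r'.takeWhile (· == y)).length + 1) :: pvRuns (r'.dropWhile (· == y)))
          = pvDictOfRuns
              (pvFlush (pvFlush acc x ((j + (l.takeWhile (· == x)).length : Nat) : Int)) y
                (((r'.takeWhile (· == y)).length + 1 : Nat) : Int))
              (pvRuns (r'.dropWhile (· == y))) from rfl]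
      congr 2
      omega

theorem pvFoldG : ∀ (l : List Char) (x : Char) (j : Nat) (acc : PySem.Dict Char (Int × Int × Int)),
    pvFinalB (l.foldl pvStepB (some x, (j : Int), acc))
      = pvDictOfRuns (pvFlush acc x ((j + (l.takeWhile (· == x)).length : Nat) : Int))
          (pvRuns (l.dropWhile (· == x))) := fun l => pvFoldG_aux l.length l le_rfl

theorem pvFinal_eq (s : List Char) :
    pvFinalB (s.foldl pvStepB (none, 0, PySem.Dict.empty))
      = pvDictOfRuns PySem.Dict.empty (pvRuns s) := by
  cases s with
  | nil => simp [pvFinalB, pvRuns, pvDictOfRuns]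
  | cons x t =>
    rw [List.foldl_cons]
    rw [show pvStepB (none, 0, PySem.Dict.empty) x
          = (some x, ((1 : Nat) : Int), PySem.Dict.empty) from by simp [pvStepB]]
    rw [pvFoldG t x 1 PySem.Dict.empty, pvRuns]
    rw [show pvDictOfRuns PySem.Dict.empty
          ((x, (t.takeWhile (· == x)).length + 1) :: pvRuns (t.dropWhile (· == x)))
        = pvDictOfRuns
            (pvFlush PySem.Dict.empty x (((t.takeWhile (· == x)).length + 1 : Nat) : Int))
            (pvRuns (t.dropWhile (· == x))) from rfl]
    congr 2
    omega

theorem pvGetD_dictOfRuns : ∀ (rs : List (Char × Nat)) (acc : PySem.Dict Char (Int × Int × Int)) (c : Char),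
    (pvDictOfRuns acc rs).getD c (0, 0, 0)
      = ((acc.getD c (0, 0, 0)).1 + (pvRunSum 2 c rs : Int),
         (acc.getD c (0, 0, 0)).2.1 + (pvRunSum 3 c rs : Int),
         (acc.getD c (0, 0, 0)).2.2 + (pvRunSum 4 c rs : Int)) := by
  intro rs
  induction rs with
  | nil => intro acc c; simp [pvDictOfRuns, pvRunSum]
  | cons p rs ih =>
    intro acc c
    rw [show pvDictOfRuns acc (p :: rs)
          = pvDictOfRuns (pvFlush acc p.1 ((p.2 : Nat) : Int)) rs from rfl]
    rw [ih]
    have hflush : (pvFlush acc p.1 ((p.2 : Nat) : Int)).getD c (0, 0, 0)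
        = if c = p.1 then
            ((acc.getD p.1 (0, 0, 0)).1 + ((p.2 / 2 : Nat) : Int),
             (acc.getD p.1 (0, 0, 0)).2.1 + ((p.2 / 3 : Nat) : Int),
             (acc.getD p.1 (0, 0, 0)).2.2 + ((p.2 / 4 : Nat) : Int))
          else acc.getD c (0, 0, 0) := by
      rw [pvFlush]
      rw [PySem.Dict.getD_insert]
      congr 1
      simp [pysem]
    rw [hflush]
    by_cases hc : c = p.1
    · subst hc
      simp only [pvRunSum, List.map_cons, List.sum_cons]
      push_cast
      refine Prod.ext ?_ (Prod.ext ?_ ?_) <;> simp <;> ring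
    · rw [if_neg hc]
      have hne : ¬ p.1 = c := fun h => hc h.symm
      simp [pvRunSum, hne]

theorem pvKeys_dictOfRuns : ∀ (rs : List (Char × Nat)) (acc : PySem.Dict Char (Int × Int × Int)) (c : Char),
    (c ∈ (pvDictOfRuns acc rs).keys ↔ c ∈ acc.keys ∨ c ∈ rs.map Prod.fst) := by
  intro rs
  induction rs with
  | nil => intro acc c; simp [pvDictOfRuns]
  | cons p rs ih =>
    intro acc c
    rw [show pvDictOfRuns acc (p :: rs)
          = pvDictOfRuns (pvFlush acc p.1 ((p.2 : Nat) : Int)) rs from rfl]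
    rw [ih]
    have hkeys : c ∈ (pvFlush acc p.1 ((p.2 : Nat) : Int)).keys ↔ c ∈ acc.keys ∨ c = p.1 := by
      rw [pvFlush]
      by_cases hcont : acc.contains p.1 = true
      · rw [PySem.Dict.keys_insert_of_contains _ _ hcont]
        constructor
        · exact Or.inl
        · rintro (h | rfl)
          · exact h
          · rw [PySem.Dict.contains_eq_decide_mem_keys] at hcont
            simpa using hcont
      · rw [PySem.Dict.keys_insert_of_not_contains _ _ (by simpa using hcont)]
        simp
    rw [hkeys]
    simp only [List.map_cons, List.mem_cons]
    tauto

theorem pvNodup_dictOfRuns : ∀ (rs : List (Char × Nat)) (acc : PySem.Dict Char (Int × Int × Int)),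
    acc.keys.Nodup → (pvDictOfRuns acc rs).keys.Nodup := by
  intro rs
  induction rs with
  | nil => intro acc h; exact h
  | cons p rs ih =>
    intro acc h
    exact ih _ (PySem.Dict.nodup_keys_insert _ _ _ h)

theorem pvIfLoop (b x : Bool) : (if b = true then x else true) = (!b || x) := by
  cases b <;> simp

theorem pvValuesLoop_any (l : List (Int × Int × Int)) :
    pvValuesLoop l = l.any (fun v => !(v.2.2 > 0 || (v.2.1 == 1 && v.1 == 1) || v.1 == 0)) := by
  induction l with
  | nil => rfl
  | cons v rest ih =>
    obtain ⟨c2, c3, c4⟩ := v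
    simp only [pvValuesLoop, List.any_cons, ih, pvIfLoop]

theorem pvLoopA_any (s : String) (l : List Char) :
    pvLoopA s l = l.any (fun c => !pvCondA s c) := by
  induction l with
  | nil => rfl
  | cons c rest ih =>
    simp only [pvLoopA, List.any_cons, ih, pvIfLoop]

theorem pvCondA_eq (s : String) (c : Char) (n2 n3 n4 : Nat)
    (h2 : PySem.Str.count s (pvRep 2 c) = n2)
    (h3 : PySem.Str.count s (pvRep 3 c) = n3)
    (h4 : PySem.Str.count s (pvRep 4 c) = n4) :
    pvCondA s c = (((n4 : Int) > 0 || ((n3 : Int) == 1 && (n2 : Int) == 1) || (n2 : Int) == 0)) := by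
  simp only [pvCondA, h2, h3, h4]
  rw [Bool.eq_iff_iff]; simp

-- ===== VERDICT (by name: the statement is the Claim_ definition above) =====
theorem pvCond_char (s : String) (c : Char) :
    pvCondA s c
      = (let v := (pvDictOfRuns PySem.Dict.empty (pvRuns s.toList)).getD c (0, 0, 0)
         (v.2.2 > 0 || (v.2.1 == 1 && v.1 == 1) || v.1 == 0)) := by
  have hcount : ∀ k, 1 ≤ k → PySem.Str.count s (pvRep k c) = pvRunSum k c (pvRuns s.toList) := by
    intro k hk
    rw [PySem.Str.count_eq, pvRep]
    rw [show (String.ofList (List.replicate k c)).toList = List.replicate k c by simp]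
    rw [pvCount_eq k c hk, pvCnt_runs k c hk]
  have hgetD : (pvDictOfRuns PySem.Dict.empty (pvRuns s.toList)).getD c (0, 0, 0)
      = ((pvRunSum 2 c (pvRuns s.toList) : Int), (pvRunSum 3 c (pvRuns s.toList) : Int),
         (pvRunSum 4 c (pvRuns s.toList) : Int)) := by
    rw [pvGetD_dictOfRuns]
    simp [PySem.Dict.getD_empty]
  rw [pvCondA_eq s c _ _ _ (hcount 2 (by omega)) (hcount 3 (by omega)) (hcount 4 (by omega))]
  simp only [hgetD]

theorem pvMem_keys_final (s : String) (c : Char) :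
    c ∈ (pvDictOfRuns PySem.Dict.empty (pvRuns s.toList)).keys ↔ c ∈ s.toList := by
  rw [pvKeys_dictOfRuns, pvMem_runs]
  simp [show (PySem.Dict.empty : PySem.Dict Char (Int × Int × Int)).keys = [] from rfl]

theorem check_double_digits_spec : Claim_equal_check_double_digits := by
  intro s _
  unfold Spec_check_double_digits
  rw [check_double_digits, check_double_digits_alt, pvFinal_eq]
  rw [pvLoopA_any, pvValuesLoop_any]
  rw [show PySem.Dict.values (pvDictOfRuns PySem.Dict.empty (pvRuns s.toList))
        = (pvDictOfRuns PySem.Dict.empty (pvRuns s.toList)).items.map (fun p => p.2) from rfl]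
  rw [List.any_map]
  rw [Bool.eq_iff_iff]
  simp only [List.any_eq_true]
  have hnodup : (pvDictOfRuns PySem.Dict.empty (pvRuns s.toList)).keys.Nodup :=
    pvNodup_dictOfRuns _ _ PySem.Dict.nodup_keys_empty
  constructor
  · rintro ⟨c, hcmem, hc⟩
    have hcs : c ∈ s.toList := (PySem.Set.mem_ofList _ _).mp hcmem
    have hck : c ∈ (pvDictOfRuns PySem.Dict.empty (pvRuns s.toList)).keys :=
      (pvMem_keys_final s c).mpr hcs
    obtain ⟨⟨c', v⟩, hpin, hfst⟩ := List.mem_map.mp hck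
    obtain rfl : c = c' := hfst.symm
    refine ⟨(c, v), hpin, ?_⟩
    have hv : (pvDictOfRuns PySem.Dict.empty (pvRuns s.toList)).getD c (0, 0, 0) = v :=
      PySem.Dict.getD_of_mem_items _ hpin hnodup _
    rw [pvCond_char s c] at hc
    simp only [hv] at hc
    exact hc
  · rintro ⟨⟨c, v⟩, hpin, hp⟩
    have hck : c ∈ (pvDictOfRuns PySem.Dict.empty (pvRuns s.toList)).keys :=
      PySem.Dict.mem_keys_of_mem_items _ hpin
    have hcs : c ∈ s.toList := (pvMem_keys_final s c).mp hck
    refine ⟨c, (PySem.Set.mem_ofList _ _).mpr hcs, ?_⟩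
    have hv : (pvDictOfRuns PySem.Dict.empty (pvRuns s.toList)).getD c (0, 0, 0) = v :=
      PySem.Dict.getD_of_mem_items _ hpin hnodup _
    rw [pvCond_char s c]
    simp only [hv]
    exact hp
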